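-- pv_equiv track=rewrite | github.com/vmgarciadv/mamma_maglioni | archivo.py | obtener_ingredientes
-- ===== SOURCE A (Python) =====
-- def obtener_ingredientes(pizz_ing):
--     i=0
--     ing = ""
--     ingredientes = []
--     for x in pizz_ing:
--         if (i == 1 and (x != "\n" and x != ";")):
--             ing += x
--         elif (i == 1 and (x == "\n" or x == ";")):
--             ingredientes.append(ing)
--             ing = ""
--         if x == ";": i=1
--     return ingredientes
-- ===== SOURCE B (Python) =====
-- def obtener_ingredientes(pizz_ing):
--     # find-then-split pipeline: everything after the first ';' is split on ';' or '\n';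
--     # the trailing unterminated chunk is dropped.
--     idx = pizz_ing.find(";")
--     if idx == -1:
--         return []
--     rest = pizz_ing[idx + 1:]
--     return rest.replace("\n", ";").split(";")[:-1]
-- ===== Notes on version B (the rewrite author's own statement) =====
-- stated objective: simpler
-- what changed: Replaced A's 0/1 character state machine with a find-then-split pipeline: locate the first semicolon, take the substring after it, normalize newlines to semicolons, split on semicolons and drop the trailing unterminated chunk with a slice.
import Mathlib
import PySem

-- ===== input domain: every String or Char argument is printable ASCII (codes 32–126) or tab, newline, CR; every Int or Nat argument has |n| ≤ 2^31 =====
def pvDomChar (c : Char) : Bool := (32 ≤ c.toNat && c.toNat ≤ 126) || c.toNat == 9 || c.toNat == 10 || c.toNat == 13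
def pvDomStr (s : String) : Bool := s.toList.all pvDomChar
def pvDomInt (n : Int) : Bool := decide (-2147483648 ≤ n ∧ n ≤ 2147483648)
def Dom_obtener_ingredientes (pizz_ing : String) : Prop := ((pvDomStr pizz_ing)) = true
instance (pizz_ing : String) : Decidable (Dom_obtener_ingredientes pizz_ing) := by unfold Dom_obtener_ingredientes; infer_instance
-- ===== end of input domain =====

-- B replaces A's i=0/1 character state machine by a find-then-split pipeline
-- (find first ';', split the rest on ';'/'\n', drop the trailing unterminated chunk); objective: simpler.

-- ===== PORT A =====
-- one loop step of A: state = (i, ing, ingredientes)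
def pvStepA (acc : Nat × List Char × List String) (x : Char) : Nat × List Char × List String :=
  let i := acc.1
  let ing := acc.2.1
  let out := acc.2.2
  let p : List Char × List String :=
    if i == 1 && (!(x == '\n') && !(x == ';')) then (ing ++ [x], out)
    else if i == 1 && (x == '\n' || x == ';') then ([], out ++ [String.ofList ing])
    else (ing, out)
  (if x == ';' then 1 else i, p.1, p.2)

def obtener_ingredientes (pizz_ing : String) : List String :=
  (pizz_ing.toList.foldl pvStepA (0, [], [])).2.2

-- ===== PORT B =====
def obtener_ingredientes_alt (pizz_ing : String) : List String :=
  let idx := PySem.Str.find pizz_ing ";"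
  if idx == -1 then []
  else
    let rest := PySem.Str.slice pizz_ing (some (idx + 1)) none
    let parts := (PySem.Chars.splitOn
        (PySem.Chars.replace rest.toList ['\n'] [';']) [';']).map String.ofList
    PySem.List.slice parts none (some (-1))

-- ===== PRECONDITION & SPEC =====
def Spec_obtener_ingredientes (pizz_ing : String) (out : List String) : Prop := out = obtener_ingredientes_alt pizz_ing
instance (pizz_ing : String) (out : List String) : Decidable (Spec_obtener_ingredientes pizz_ing out) := by unfold Spec_obtener_ingredientes; infer_instance

-- ===== CLAIM (what is proved, stated in full; the proofs are below) =====
def Claim_equal_obtener_ingredientes : Prop := ∀ (pizz_ing : String), Dom_obtener_ingredientes pizz_ing → Spec_obtener_ingredientes pizz_ing (obtener_ingredientes pizz_ing)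

-- ===== LEMMAS AND PROOFS =====

-- the suffix after the first ';', if any
def pvChop : List Char → Option (List Char)
  | [] => none
  | x :: xs => if x = ';' then some xs else pvChop xs

-- Python str.split(';') on a char list, as a structural recursion
def pvSplits : List Char → List Char → List (List Char)
  | pre, [] => [pre]
  | pre, x :: xs => if x = ';' then pre :: pvSplits [] xs else pvSplits (pre ++ [x]) xs

-- the character substitution performed by replace("\n", ";")
def pvSub (x : Char) : Char := if x = '\n' then ';' else x

-- segments emitted by A's phase-1 loop (trailing chunk dropped)
def pvSegs : List Char → List Char → List String
  | _, [] => []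
  | ing, x :: xs => if x = ';' ∨ x = '\n' then String.ofList ing :: pvSegs [] xs
                    else pvSegs (ing ++ [x]) xs

theorem pvSplits_ne_nil (pre l : List Char) : pvSplits pre l ≠ [] := by
  induction l generalizing pre with
  | nil => simp [pvSplits]
  | cons x xs ih => by_cases h : x = ';' <;> simp [pvSplits, h, ih]

theorem pv_splitOn_go (l : List Char) : ∀ (cur : List Char) (h : List (List Char))
    (fuel : Nat), l.length < fuel →
    PySem.Chars.splitOn.go [';'] fuel l cur h = h.reverse ++ pvSplits cur.reverse l := by
  induction l with
  | nil =>
    intro cur h fuel hf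
    cases fuel with
    | zero => omega
    | succ f => simp [PySem.Chars.splitOn.go, pvSplits]
  | cons x xs ih =>
    intro cur h fuel hf
    cases fuel with
    | zero => omega
    | succ f =>
      by_cases hx : x = ';'
      · subst hx
        have hp : [';'].isPrefixOf (';' :: xs) = true := by simp [List.isPrefixOf]
        simp only [PySem.Chars.splitOn.go, hp, if_true, List.length_singleton,
          List.drop_succ_cons, List.drop_zero]
        rw [ih [] (cur.reverse :: h) f (by simpa using hf)]
        simp [pvSplits]
      · have hp : [';'].isPrefixOf (x :: xs) = false := by
          simp [List.isPrefixOf]; exact fun hh => hx hh.symm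
        simp only [PySem.Chars.splitOn.go, hp, Bool.false_eq_true, if_false]
        rw [ih (x :: cur) h f (by simpa using hf)]
        simp [pvSplits, hx]

theorem pv_splitOn (l : List Char) :
    PySem.Chars.splitOn l [';'] = pvSplits [] l := by
  unfold PySem.Chars.splitOn
  rw [pv_splitOn_go l [] [] (l.length + 1) (by omega)]
  simp

theorem pv_replace_go (l : List Char) : ∀ (acc : List Char) (fuel : Nat),
    l.length ≤ fuel →
    PySem.Chars.replace.go ['\n'] [';'] fuel l acc = acc.reverse ++ l.map pvSub := by
  induction l with
  | nil =>
    intro acc fuel _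
    cases fuel <;> simp [PySem.Chars.replace.go]
  | cons x xs ih =>
    intro acc fuel hf
    cases fuel with
    | zero => simp at hf
    | succ f =>
      by_cases hx : x = '\n'
      · subst hx
        have hp : ['\n'].isPrefixOf ('\n' :: xs) = true := by simp [List.isPrefixOf]
        simp only [PySem.Chars.replace.go, hp, if_true, List.length_singleton,
          List.drop_succ_cons, List.drop_zero, List.reverse_singleton, List.singleton_append]
        rw [ih (';' :: acc) f (by simpa using hf)]
        simp [pvSub]
      · have hp : ['\n'].isPrefixOf (x :: xs) = false := by
          simp [List.isPrefixOf]; exact fun hh => hx hh.symm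
        simp only [PySem.Chars.replace.go, hp, Bool.false_eq_true, if_false]
        rw [ih (x :: acc) f (by simpa using hf)]
        simp [pvSub, hx]

theorem pv_replace (l : List Char) :
    PySem.Chars.replace l ['\n'] [';'] = l.map pvSub := by
  unfold PySem.Chars.replace
  rw [if_neg (by simp), pv_replace_go l [] l.length le_rfl]
  simp

theorem pv_splits_segs (l : List Char) : ∀ ing : List Char,
    ((pvSplits ing (l.map pvSub)).dropLast).map String.ofList = pvSegs ing l := by
  induction l with
  | nil => intro ing; simp [pvSplits, pvSegs]
  | cons x xs ih =>
    intro ing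
    by_cases hd : x = ';' ∨ x = '\n'
    · have hs : pvSub x = ';' := by rcases hd with h | h <;> simp [pvSub, h]
      simp only [List.map_cons, hs, pvSplits, pvSegs, if_pos hd, if_true]
      rw [List.dropLast_cons_of_ne_nil (pvSplits_ne_nil [] (xs.map pvSub))]
      simp [ih]
    · rw [not_or] at hd
      have hnd : ¬ (x = ';' ∨ x = '\n') := by tauto
      have hs : pvSub x = x := by simp [pvSub, hd.2]
      simp only [List.map_cons, hs, pvSplits, pvSegs, if_neg hd.1, if_neg hnd]
      exact ih (ing ++ [x])

theorem pv_phase0 (l : List Char) : ∀ out : List String,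
    l.foldl pvStepA (0, [], out) =
      (pvChop l).elim (0, [], out) (fun rest => rest.foldl pvStepA (1, [], out)) := by
  induction l with
  | nil => intro out; simp [pvChop]
  | cons x xs ih =>
    intro out
    by_cases hx : x = ';'
    · subst hx; simp [pvChop, pvStepA]
    · simp only [List.foldl_cons, pvChop, if_neg hx]
      have : pvStepA (0, [], out) x = (0, [], out) := by
        simp [pvStepA, hx]
      rw [this, ih]

theorem pv_phase1 (l : List Char) : ∀ (ing : List Char) (out : List String),
    (l.foldl pvStepA (1, ing, out)).2.2 = out ++ pvSegs ing l := by
  induction l with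
  | nil => intro ing out; simp [pvSegs]
  | cons x xs ih =>
    intro ing out
    by_cases hd : x = ';' ∨ x = '\n'
    · have hstep : pvStepA (1, ing, out) x = (1, [], out ++ [String.ofList ing]) := by
        rcases hd with h | h <;> simp [pvStepA, h]
      simp only [List.foldl_cons, hstep, pvSegs, if_pos hd]
      simp [ih]
    · rw [not_or] at hd
      have hnd : ¬ (x = ';' ∨ x = '\n') := by tauto
      have hstep : pvStepA (1, ing, out) x = (1, ing ++ [x], out) := by
        simp [pvStepA, hd.1, hd.2]
      simp only [List.foldl_cons, hstep, pvSegs, if_neg hnd]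
      exact ih (ing ++ [x]) out

theorem pvChop_eq_none_iff (l : List Char) : pvChop l = none ↔ ';' ∉ l := by
  induction l with
  | nil => simp [pvChop]
  | cons x xs ih =>
    by_cases hx : x = ';' <;> simp [pvChop, hx, ih, eq_comm]

theorem pvChop_of_find (l : List Char) : ∀ n : Nat,
    [';'] <+: l.drop n → (∀ i < n, ¬ [';'] <+: l.drop i) →
    pvChop l = some (l.drop (n + 1)) := by
  induction l with
  | nil => intro n h _; simp at h
  | cons x xs ih =>
    intro n h hmin
    cases n with
    | zero =>
      simp only [List.drop_zero] at h
      obtain ⟨t, ht⟩ := h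
      cases ht
      simp [pvChop]
    | succ k =>
      have hx : x ≠ ';' := by
        intro hx; subst hx
        exact hmin 0 (by omega) (by simp)
      simp only [pvChop, if_neg hx, List.drop_succ_cons]
      exact ih k h (fun i hi => hmin (i + 1) (by omega))

-- ===== VERDICT (by name: the statement is the Claim_ definition above) =====
theorem obtener_ingredientes_spec : Claim_equal_obtener_ingredientes := by
  intro s _
  unfold Spec_obtener_ingredientes obtener_ingredientes obtener_ingredientes_alt
  have hfind : PySem.Str.find s ";" = PySem.Chars.find s.toList [';'] := by
    simp [PySem.Str.find]
  by_cases hneg : PySem.Chars.find s.toList [';'] = -1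
  · -- no ';' in the string: both sides are []
    have hinf := (PySem.Chars.find_eq_neg_one_iff s.toList [';']).mp hneg
    have hnot : ';' ∉ s.toList := by
      intro hm
      obtain ⟨l₁, l₂, hsplit⟩ := List.append_of_mem hm
      exact hinf ⟨l₁, l₂, by simp [hsplit]⟩
    rw [pv_phase0, (pvChop_eq_none_iff s.toList).mpr hnot]
    rw [hfind, hneg]
    simp
  · have h0 : 0 ≤ PySem.Chars.find s.toList [';'] := by
      have := PySem.Chars.neg_one_le_find s.toList [';']
      omega
    obtain ⟨hpre, hmin⟩ := PySem.Chars.find_spec h0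
    have hchop : pvChop s.toList =
        some (s.toList.drop ((PySem.Chars.find s.toList [';']).toNat + 1)) :=
      pvChop_of_find s.toList _ hpre hmin
    rw [pv_phase0, hchop]
    simp only [Option.elim]
    rw [pv_phase1]
    rw [hfind, if_neg (by simpa using hneg)]
    have hslice : (PySem.Str.slice s (some (PySem.Chars.find s.toList [';'] + 1)) none).toList
        = s.toList.drop ((PySem.Chars.find s.toList [';']).toNat + 1) := by
      rw [PySem.Str.toList_slice, PySem.Chars.slice_eq_listSlice,
        PySem.List.slice_from _ (by omega)]
      congr 1
      omega
    rw [hslice, pv_replace, pv_splitOn, PySem.List.slice_to_neg_one,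
      ← List.map_dropLast, pv_splits_segs]
    simp
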